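-- pv_equiv track=rewrite | github.com/MRiffiAslett/AgentZola | WhiteFox/requirement/prompt_gen.py | strip_cpp_boilerplate
-- ===== SOURCE A (Python) =====
-- def strip_cpp_boilerplate(code: str) -> str:
--     lines = code.split("\n")
--
--     last_include_idx = -1
--     for i, line in enumerate(lines):
--         stripped = line.strip()
--         if stripped.startswith("#include"):
--             last_include_idx = i
--
--     if last_include_idx == -1:
--         return code
--
--     remaining = lines[last_include_idx + 1 :]
--
--     while remaining and not remaining[0].strip():
--         remaining.pop(0)
--
--     return "\n".join(remaining)
-- ===== SOURCE B (Python) =====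
-- def strip_cpp_boilerplate(code: str) -> str:
--     lines = code.split("\n")
--     for i in range(len(lines) - 1, -1, -1):
--         if lines[i].strip().startswith("#include"):
--             remaining = lines[i + 1:]
--             j = next((k for k, l in enumerate(remaining) if l.strip()), len(remaining))
--             return "\n".join(remaining[j:])
--     return code
-- ===== Notes on version B (the rewrite author's own statement) =====
-- stated objective: simpler
-- what changed: B scans the lines from the end and stops at the first include-directive line (instead of a full forward pass recording the last index), then slices at the first non-blank index (instead of a pop(0) mutation loop) before joining.
import Mathlib
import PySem

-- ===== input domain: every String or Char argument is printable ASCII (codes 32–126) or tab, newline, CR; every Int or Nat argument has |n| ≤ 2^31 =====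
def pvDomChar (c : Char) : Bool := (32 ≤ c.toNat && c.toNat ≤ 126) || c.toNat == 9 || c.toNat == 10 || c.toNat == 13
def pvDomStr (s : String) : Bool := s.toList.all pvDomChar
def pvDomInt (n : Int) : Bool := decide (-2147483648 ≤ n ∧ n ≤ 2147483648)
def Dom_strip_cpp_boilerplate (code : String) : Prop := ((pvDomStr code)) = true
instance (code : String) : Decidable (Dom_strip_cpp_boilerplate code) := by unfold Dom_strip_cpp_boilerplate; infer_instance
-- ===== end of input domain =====

-- B replaces A's forward last-include scan and pop(0) mutation loop by a reverse scan with
-- early exit plus a slice at the first non-blank index (objective: simpler; same cost).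

-- shared one-line test 'line.strip().startswith("#include")' (appears verbatim in both Pythons)
def pvIsInclude (s : String) : Bool := PySem.Str.startswith (PySem.Str.strip s) "#include"

-- ===== PORT A =====
-- A's 'while remaining and not remaining[0].strip(): remaining.pop(0)' loop, step for step
def pvPopBlanks : List String → List String
  | [] => []
  | l :: ls => if PySem.Str.strip l == "" then pvPopBlanks ls else l :: ls

def strip_cpp_boilerplate (code : String) : String :=
  -- code.split("\n"): sep is the non-empty literal "\n", so split? is always 'some'
  let lines := (PySem.Str.split? code "\n").getD []
  let last_include_idx :=
    (PySem.List.enumerate lines 0).foldl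
      (fun acc p => if pvIsInclude p.2 then p.1 else acc) (-1)
  if last_include_idx == -1 then code
  else
    let remaining := PySem.List.slice lines (some (last_include_idx + 1)) none
    PySem.Str.join "\n" (pvPopBlanks remaining)

-- ===== PORT B =====
-- B's 'for i in range(len(lines)-1, -1, -1): …' — first hit scanning the lines from the end
def pvRevFindInclude : List (Int × String) → Option Int
  | [] => none
  | (i, l) :: rest => if pvIsInclude l then some i else pvRevFindInclude rest

def strip_cpp_boilerplate_alt (code : String) : String :=
  let lines := (PySem.Str.split? code "\n").getD []
  match pvRevFindInclude (PySem.List.enumerate lines 0).reverse with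
  | none => code
  | some i =>
      let remaining := PySem.List.slice lines (some (i + 1)) none
      -- next(k for k, l in enumerate(remaining) if l.strip()) with default len(remaining)
      let j := remaining.findIdx (fun l => !(PySem.Str.strip l == ""))
      PySem.Str.join "\n" (remaining.drop j)

-- ===== PRECONDITION & SPEC =====
def Spec_strip_cpp_boilerplate (code : String) (out : String) : Prop := out = strip_cpp_boilerplate_alt code
instance (code : String) (out : String) : Decidable (Spec_strip_cpp_boilerplate code out) := by unfold Spec_strip_cpp_boilerplate; infer_instance

-- ===== CLAIM (what is proved, stated in full; the proofs are below) =====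
def Claim_equal_strip_cpp_boilerplate : Prop := ∀ (code : String), Dom_strip_cpp_boilerplate code → Spec_strip_cpp_boilerplate code (strip_cpp_boilerplate code)

-- ===== LEMMAS AND PROOFS =====

-- A's left fold keeping the LAST matching index equals B's reverse scan keeping the FIRST hit
theorem pv_fold_eq_revFind (l : List (Int × String)) :
    l.foldl (fun acc p => if pvIsInclude p.2 then p.1 else acc) (-1)
      = (pvRevFindInclude l.reverse).getD (-1) := by
  induction l using List.reverseRecOn with
  | nil => rfl
  | append_singleton l x ih =>
      obtain ⟨a, b⟩ := x
      rw [List.foldl_append, List.reverse_append]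
      cases h : pvIsInclude b <;>
        simp [pvRevFindInclude, h, ih]

theorem pv_revFind_some_mem : ∀ (l : List (Int × String)) (i : Int),
    pvRevFindInclude l = some i → ∃ t, (i, t) ∈ l := by
  intro l
  induction l with
  | nil => intro i h; simp [pvRevFindInclude] at h
  | cons p rest ih =>
      intro i h
      obtain ⟨a, b⟩ := p
      cases hp : pvIsInclude b
      · simp [pvRevFindInclude, hp] at h
        obtain ⟨t, ht⟩ := ih i h
        exact ⟨t, List.mem_cons_of_mem _ ht⟩
      · simp [pvRevFindInclude, hp] at h
        exact ⟨b, by simp [h]⟩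

theorem pv_enumerate_fst_nonneg (lines : List String) (i : Int) (t : String)
    (h : (i, t) ∈ PySem.List.enumerate lines 0) : 0 ≤ i := by
  obtain ⟨k, hk, hget⟩ := List.getElem_of_mem h
  rw [PySem.List.getElem_enumerate] at hget
  have : i = 0 + (k : Int) := congrArg Prod.fst hget.symm
  omega

-- A's blank-popping loop is B's slice at the first non-blank index
theorem pv_popBlanks_eq_drop (rem : List String) :
    pvPopBlanks rem = rem.drop (rem.findIdx (fun l => !(PySem.Str.strip l == ""))) := by
  induction rem with
  | nil => rfl
  | cons l ls ih =>
      cases hb : (PySem.Str.strip l == "") <;>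
        simp [pvPopBlanks, List.findIdx_cons, hb, ih]

-- ===== VERDICT (by name: the statement is the Claim_ definition above) =====
theorem strip_cpp_boilerplate_spec : Claim_equal_strip_cpp_boilerplate := by
  intro code _
  unfold Spec_strip_cpp_boilerplate strip_cpp_boilerplate strip_cpp_boilerplate_alt
  dsimp only
  rw [pv_fold_eq_revFind]
  cases hfind : pvRevFindInclude
      (PySem.List.enumerate ((PySem.Str.split? code "\n").getD []) 0).reverse with
  | none => rfl
  | some i =>
      obtain ⟨t, ht⟩ := pv_revFind_some_mem _ _ hfind
      have hi : 0 ≤ i := pv_enumerate_fst_nonneg _ _ _ (List.mem_reverse.mp ht)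
      have hne : (i == (-1 : Int)) = false := beq_eq_false_iff_ne.mpr (by omega)
      simp [hne, pv_popBlanks_eq_drop]
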